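-- pv_equiv track=rewrite | github.com/jramaswami/Binary_Search_Python | string_equivalence_relations.py | solve
-- ===== SOURCE A (Python) =====
-- from itertools import chain
--
-- def solve(a, b, target):
--     """
--     Use a Disjoint Set augmented with the minimum character in the set
--     to solve the problem.
--     """
--     parent = {}
--     minlex = {}
--
--     def make_set(ltr):
--         parent[ltr] = ltr
--         minlex[ltr] = ltr
--
--     def find_set(ltr):
--         if (ltr == parent[ltr]):
--             return ltr
--         return find_set(parent[ltr])
--
--     def union_sets(s, t):
--         s = find_set(s)
--         t = find_set(t)
--         if (s != t):
--             parent[t] = s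
--             minlex[t] = minlex[s] = min(minlex[s], minlex[t])
--
--     # Initialize DSU
--     for c in chain(a, b, target):
--         make_set(c)
--
--     # Unite sets
--     for s, t in zip(a, b):
--         union_sets(s, t)
--
--     return "".join(minlex[find_set(c)] for c in target)
-- ===== SOURCE B (Python) =====
-- def solve(a, b, target):
--     # Flat representative map: label maps each seen character directly to the
--     # minimum character of its equivalence class (no parent tree, no find).
--     label = {}
--     for s, t in zip(a, b):
--         rs = label.get(s, s)
--         rt = label.get(t, t)
--         if rs != rt:
--             m = min(rs, rt)
--             label = {k: (m if v == rs or v == rt else v) for k, v in label.items()}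
--             label[s] = m
--             label[t] = m
--     return "".join(label.get(c, c) for c in target)
-- ===== Notes on version B (the rewrite author's own statement) =====
-- stated objective: faster
-- what changed: A's parent-tree union-find (recursive find with no path compression, minimum stored at the root) is replaced by a single flat dictionary mapping each seen character directly to the minimum character of its class, rebuilt by relabelling on each union, so lookups are O(1) and there is no tree walk.
import Mathlib
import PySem

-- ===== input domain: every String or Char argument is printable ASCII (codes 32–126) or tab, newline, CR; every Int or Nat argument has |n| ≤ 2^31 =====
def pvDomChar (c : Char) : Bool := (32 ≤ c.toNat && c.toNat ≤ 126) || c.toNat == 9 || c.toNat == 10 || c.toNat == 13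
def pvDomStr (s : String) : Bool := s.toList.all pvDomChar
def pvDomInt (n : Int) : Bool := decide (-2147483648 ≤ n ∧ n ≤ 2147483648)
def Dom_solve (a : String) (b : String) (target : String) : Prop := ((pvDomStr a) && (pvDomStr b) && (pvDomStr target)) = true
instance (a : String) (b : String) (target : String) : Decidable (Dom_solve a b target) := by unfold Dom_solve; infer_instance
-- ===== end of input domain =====

-- B replaces A's parent-tree union-find (recursive find, no compression) by a flat map from each
-- character to the minimum of its class, rebuilt on each union; same return value on every input.

-- ===== PORT A =====
-- find_set: Python recurses until parent[ltr] == ltr; the parent map is a forest, so recursion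
-- depth is < number of keys; the fuel items.length + 1 is proven sufficient below (pvFind_eq).
def pvFind : Nat → PySem.Dict Char Char → Char → Char
  | 0, _, c => c
  | fuel+1, p, c => if p.getD c c = c then c else pvFind fuel p (p.getD c c)

-- the init loop: make_set(c) for c in chain(a, b, target)
def pvMakeSets (chars : List Char) : PySem.Dict Char Char × PySem.Dict Char Char :=
  chars.foldl (fun pm c => (pm.1.insert c c, pm.2.insert c c)) (PySem.Dict.empty, PySem.Dict.empty)

-- union_sets(s, t); minlex[s]/minlex[t] are read with getD (the key is always present in Python)
def pvUnion (pm : PySem.Dict Char Char × PySem.Dict Char Char) (st : Char × Char) :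
    PySem.Dict Char Char × PySem.Dict Char Char :=
  let p := pm.1
  let ml := pm.2
  let s := pvFind (p.items.length + 1) p st.1
  let t := pvFind (p.items.length + 1) p st.2
  if s ≠ t then
    let m := min (ml.getD s s) (ml.getD t t)   -- min on 1-char Python strings = code-point min
    (p.insert t s, (ml.insert t m).insert s m)
  else pm

def solve (a : String) (b : String) (target : String) : String :=
  let pm0 := pvMakeSets (a.toList ++ b.toList ++ target.toList)
  let pm := (a.toList.zip b.toList).foldl pvUnion pm0
  -- "".join(minlex[find_set(c)] for c in target); the key is always present in Python, so getD is exact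
  String.ofList (target.toList.map (fun c =>
    let r := pvFind (pm.1.items.length + 1) pm.1 c
    pm.2.getD r r))

-- ===== PORT B =====
def pvRelabel (lbl : PySem.Dict Char Char) (st : Char × Char) : PySem.Dict Char Char :=
  let rs := lbl.getD st.1 st.1
  let rt := lbl.getD st.2 st.2
  if rs ≠ rt then
    let m := min rs rt
    let lbl1 := PySem.Dict.mk (lbl.items.map (fun kv => (kv.1, if kv.2 = rs ∨ kv.2 = rt then m else kv.2)))
    (lbl1.insert st.1 m).insert st.2 m
  else lbl

def solve_alt (a : String) (b : String) (target : String) : String :=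
  let lbl := (a.toList.zip b.toList).foldl pvRelabel PySem.Dict.empty
  String.ofList (target.toList.map (fun c => lbl.getD c c))

-- ===== PRECONDITION & SPEC =====
def Spec_solve (a : String) (b : String) (target : String) (out : String) : Prop := out = solve_alt a b target
instance (a : String) (b : String) (target : String) (out : String) : Decidable (Spec_solve a b target out) := by unfold Spec_solve; infer_instance

-- ===== CLAIM (what is proved, stated in full; the proofs are below) =====
def Claim_equal_solve : Prop := ∀ (a : String) (b : String) (target : String), Dom_solve a b target → Spec_solve a b target (solve a b target)

-- ===== LEMMAS AND PROOFS =====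

-- path from c to its root r in n parent steps
inductive PvReach (p : PySem.Dict Char Char) : Char → Char → Nat → Prop
  | root (c : Char) (h : p.getD c c = c) : PvReach p c c 0
  | step (c r : Char) (n : Nat) (h : p.getD c c ≠ c) (ih : PvReach p (p.getD c c) r n) :
      PvReach p c r (n + 1)

-- number of non-root entries of the parent dict (bounds every path length)
def pvNr (p : PySem.Dict Char Char) : Nat :=
  (p.items.filter (fun kv => decide (kv.2 ≠ kv.1))).length

theorem pvReach_unique {p : PySem.Dict Char Char} {c r r' : Char} {n n' : Nat}
    (h : PvReach p c r n) (h' : PvReach p c r' n') : r = r' := by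
  induction h generalizing n' with
  | root c hc => cases h' with
    | root _ _ => rfl
    | step _ _ _ hne _ => exact absurd hc hne
  | step c r n hne hrec ih => cases h' with
    | root _ hc => exact absurd hc hne
    | step _ _ _ _ hrec' => exact ih hrec'

theorem pvReach_root {p : PySem.Dict Char Char} {c r : Char} {n : Nat}
    (h : PvReach p c r n) : p.getD r r = r := by
  induction h with
  | root c hc => exact hc
  | step _ _ _ _ _ ih => exact ih

theorem pvFind_of_reach {p : PySem.Dict Char Char} {c r : Char} {n : Nat}
    (h : PvReach p c r n) : ∀ fuel, n < fuel → pvFind fuel p c = r := by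
  induction h with
  | root c hc =>
      intro fuel hf
      match fuel with
      | f + 1 => simp [pvFind, hc]
  | step c r n hne hrec ih =>
      intro fuel hf
      match fuel with
      | f + 1 =>
        simp only [pvFind, if_neg hne]
        exact ih f (by omega)

-- the invariant relating A's (parent, minlex) state to B's flat label map, through a ghost root map ρ
def PvInv (p ml lbl : PySem.Dict Char Char) (ρ : Char → Char) : Prop :=
  p.keys.Nodup ∧
  (∀ c, ∃ n, n ≤ pvNr p ∧ PvReach p c (ρ c) n) ∧
  (∀ c, (p.get? c).isSome → p.get? (ρ c) = some (ρ c)) ∧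
  (∀ c, ρ (ml.getD (ρ c) (ρ c)) = ρ c) ∧
  (∀ c, lbl.getD c c = ml.getD (ρ c) (ρ c)) ∧
  (∀ c, lbl.get? c = none → ∀ d, ρ d = ρ c → d = c)

theorem pvFind_eq {p : PySem.Dict Char Char} {ρ : Char → Char}
    (hR : ∀ c, ∃ n, n ≤ pvNr p ∧ PvReach p c (ρ c) n) (c : Char) :
    pvFind (p.items.length + 1) p c = ρ c := by
  obtain ⟨n, hn, hr⟩ := hR c
  have hb : pvNr p ≤ p.items.length := List.length_filter_le _ _
  exact pvFind_of_reach hr _ (by omega)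

theorem pvRho_idem {p : PySem.Dict Char Char} {ρ : Char → Char}
    (hR : ∀ c, ∃ n, n ≤ pvNr p ∧ PvReach p c (ρ c) n) (c : Char) : ρ (ρ c) = ρ c := by
  obtain ⟨n, _, hr⟩ := hR c
  obtain ⟨n', _, hr'⟩ := hR (ρ c)
  exact (pvReach_unique hr' (PvReach.root _ (pvReach_root hr))).symm ▸ rfl

-- rerouting lemmas for parent[rt] := rs
theorem pvReach_insert_ne {p : PySem.Dict Char Char} {c r rt rs : Char} {n : Nat}
    (hroot_t : p.getD rt rt = rt) (h : PvReach p c r n) (hr : r ≠ rt) :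
    PvReach (p.insert rt rs) c r n := by
  induction h with
  | root c hc =>
      refine PvReach.root _ ?_
      rw [PySem.Dict.getD_insert, if_neg hr, hc]
  | step c r n hne hrec ih =>
      have hcrt : c ≠ rt := fun hceq => hne (by rw [hceq, hroot_t])
      have hgd : (p.insert rt rs).getD c c = p.getD c c := by
        rw [PySem.Dict.getD_insert, if_neg hcrt]
      refine PvReach.step _ _ _ (by rw [hgd]; exact hne) ?_
      rw [hgd]; exact ih hr

theorem pvReach_insert_rt {p : PySem.Dict Char Char} {c rt rs : Char} {n : Nat}
    (hroot_s : p.getD rs rs = rs) (hne : rs ≠ rt)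
    (h : PvReach p c rt n) : PvReach (p.insert rt rs) c rs (n + 1) := by
  induction h with
  | root c hc =>
      have h1 : (p.insert c rs).getD c c = rs := by
        rw [PySem.Dict.getD_insert, if_pos rfl]
      refine PvReach.step _ _ _ (by rw [h1]; exact hne) ?_
      rw [h1]
      refine PvReach.root _ ?_
      rw [PySem.Dict.getD_insert, if_neg hne, hroot_s]
  | step c r n hne' hrec ih =>
      have hroot_t : p.getD r r = r := pvReach_root hrec
      have hcrt : c ≠ r := fun hceq => hne' (by rw [hceq, hroot_t])
      have hgd : (p.insert r rs).getD c c = p.getD c c := by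
        rw [PySem.Dict.getD_insert, if_neg hcrt]
      refine PvReach.step _ _ _ (by rw [hgd]; exact hne') ?_
      rw [hgd]; exact ih hne

-- list core of pvNr_insert: rewriting the unique (rt, rt) entry to (rt, rs) adds one non-root
theorem pvNr_insert_list (rt rs : Char) (hne : rs ≠ rt) :
    ∀ (l : List (Char × Char)), (l.map Prod.fst).Nodup →
    (∀ kv ∈ l, kv.1 = rt → kv.2 = rt) → (rt, rt) ∈ l →
    ((l.map (fun q => if q.1 == rt then (rt, rs) else q)).filter
        (fun kv => decide (kv.2 ≠ kv.1))).length
      = (l.filter (fun kv => decide (kv.2 ≠ kv.1))).length + 1 := by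
  intro l
  induction l with
  | nil => simp
  | cons q rest ih =>
      intro hnd hval hmem
      obtain ⟨k, v⟩ := q
      simp only [List.map_cons, List.nodup_cons] at hnd
      by_cases hk : k = rt
      · have hv : v = rt := hval (k, v) List.mem_cons_self hk
        have hrest : ∀ kv ∈ rest, (kv.1 == rt) = false := by
          intro kv hkv
          simp only [beq_eq_false_iff_ne, ne_eq]
          intro heq
          exact hnd.1 (hk ▸ heq ▸ List.mem_map_of_mem hkv)
        have hmap : rest.map (fun q => if q.1 == rt then (rt, rs) else q) = rest := by
          refine (List.map_congr_left ?_).trans (List.map_id _)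
          intro kv hkv
          simp [hrest kv hkv]
        rw [List.map_cons, hmap]
        simp [hk, hv, hne]
      · have hmem' : (rt, rt) ∈ rest := by
          rcases List.mem_cons.mp hmem with h1 | h1
          · exact absurd (congrArg Prod.fst h1).symm hk
          · exact h1
        have hlen := ih hnd.2 (fun kv hkv hhk => hval kv (List.mem_cons_of_mem _ hkv) hhk) hmem'
        have hkk : (k == rt) = false := by simp [hk]
        simp only [decide_not] at hlen ⊢
        simp only [beq_iff_eq] at hlen
        by_cases hvk : v = k <;> simp [hvk, hlen, hk]

theorem pvNr_insert {p : PySem.Dict Char Char} {rt rs : Char}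
    (hnd : p.keys.Nodup) (hmem : p.get? rt = some rt) (hne : rs ≠ rt) :
    pvNr (p.insert rt rs) = pvNr p + 1 := by
  have hcont : p.contains rt = true := by
    rw [PySem.Dict.contains_eq_isSome_get?, hmem]; rfl
  have hitems := PySem.Dict.items_insert_of_contains p rs hcont
  have hval : ∀ kv ∈ p.items, kv.1 = rt → kv.2 = rt := by
    intro kv hkv hk
    have := PySem.Dict.get?_of_mem_items p (k := kv.1) (v := kv.2)
      (by exact hkv) hnd
    rw [hk, hmem] at this
    exact (Option.some.injEq _ _ ▸ this).symm
  have hmemi : (rt, rt) ∈ p.items := PySem.Dict.mem_items_of_get?_eq_some p hmem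
  have hndk : (p.items.map Prod.fst).Nodup := by
    simpa [PySem.Dict.keys] using hnd
  unfold pvNr
  rw [hitems]
  exact pvNr_insert_list rt rs hne p.items hndk hval hmemi

theorem pv_get?_mk_map (g : Char → Char) (l : List (Char × Char)) (x : Char) :
    (PySem.Dict.mk (l.map (fun kv => (kv.1, g kv.2)))).get? x
      = ((PySem.Dict.mk l).get? x).map g := by
  induction l with
  | nil => rfl
  | cons q rest ih =>
      obtain ⟨k, v⟩ := q
      simp only [List.map_cons, PySem.Dict.get?_mk_cons]
      by_cases hk : (k == x) = true <;> simp [hk, ih]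

theorem pvInitD (l : List Char) (d : PySem.Dict Char Char) (c : Char) :
    (l.foldl (fun d c => d.insert c c) d).get? c = if c ∈ l then some c else d.get? c := by
  induction l generalizing d with
  | nil => simp
  | cons x xs ih =>
      simp only [List.foldl_cons, ih, PySem.Dict.get?_insert, List.mem_cons]
      by_cases hx : c ∈ xs <;> by_cases hcx : c = x <;> simp [hx, hcx]

theorem pvMakeSets_fst (l : List Char) :
    (pvMakeSets l).1 = l.foldl (fun d c => d.insert c c) PySem.Dict.empty := by
  unfold pvMakeSets
  have h : ∀ pm : PySem.Dict Char Char × PySem.Dict Char Char,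
      (l.foldl (fun pm c => (pm.1.insert c c, pm.2.insert c c)) pm).1
        = l.foldl (fun d c => d.insert c c) pm.1 := ?_
  · exact h _
  induction l with
  | nil => intro pm; rfl
  | cons x xs ih => intro pm; exact ih _

theorem pvMakeSets_snd (l : List Char) :
    (pvMakeSets l).2 = l.foldl (fun d c => d.insert c c) PySem.Dict.empty := by
  unfold pvMakeSets
  have h : ∀ pm : PySem.Dict Char Char × PySem.Dict Char Char,
      (l.foldl (fun pm c => (pm.1.insert c c, pm.2.insert c c)) pm).2
        = l.foldl (fun d c => d.insert c c) pm.2 := ?_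
  · exact h _
  induction l with
  | nil => intro pm; rfl
  | cons x xs ih => intro pm; exact ih _

-- one edge preserves the invariant (and the key set of parent)
theorem pvStep_inv {p ml lbl : PySem.Dict Char Char} {ρ : Char → Char}
    (h : PvInv p ml lbl ρ) (s t : Char)
    (hs : (p.get? s).isSome) (ht : (p.get? t).isSome) :
    ∃ ρ', PvInv (pvUnion (p, ml) (s, t)).1 (pvUnion (p, ml) (s, t)).2 (pvRelabel lbl (s, t)) ρ' ∧
      ∀ c, ((pvUnion (p, ml) (s, t)).1.get? c).isSome = (p.get? c).isSome := by
  obtain ⟨hnd, hR, hC3, hM1, hB1, hB2⟩ := h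
  have hfs : pvFind (p.items.length + 1) p s = ρ s := pvFind_eq hR s
  have hft : pvFind (p.items.length + 1) p t = ρ t := pvFind_eq hR t
  have hBs : lbl.getD s s = ml.getD (ρ s) (ρ s) := hB1 s
  have hBt : lbl.getD t t = ml.getD (ρ t) (ρ t) := hB1 t
  have hidem : ∀ c, ρ (ρ c) = ρ c := pvRho_idem hR
  -- μ c = μ s ↔ ρ c = ρ s (distinct components have distinct minima)
  have hμiff : ∀ c d, ml.getD (ρ c) (ρ c) = ml.getD (ρ d) (ρ d) ↔ ρ c = ρ d := by
    intro c d
    constructor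
    · intro he
      calc ρ c = ρ (ml.getD (ρ c) (ρ c)) := (hM1 c).symm
        _ = ρ (ml.getD (ρ d) (ρ d)) := by rw [he]
        _ = ρ d := hM1 d
    · intro he; rw [he]
  by_cases hcase : ρ s = ρ t
  · -- both sides take the no-op branch
    have hA : pvUnion (p, ml) (s, t) = (p, ml) := by
      simp [pvUnion, hfs, hft, hcase]
    have hB : pvRelabel lbl (s, t) = lbl := by
      simp [pvRelabel, hBs, hBt, hcase]
    rw [hA, hB]
    exact ⟨ρ, ⟨hnd, hR, hC3, hM1, hB1, hB2⟩, fun c => rfl⟩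
  · obtain ⟨ns, hns, hreach_s⟩ := hR s
    obtain ⟨nt, hnt, hreach_t⟩ := hR t
    have hTroot : p.getD (ρ t) (ρ t) = ρ t := pvReach_root hreach_t
    have hRroot : p.getD (ρ s) (ρ s) = ρ s := pvReach_root hreach_s
    have hgetR : p.get? (ρ s) = some (ρ s) := hC3 s hs
    have hgetT : p.get? (ρ t) = some (ρ t) := hC3 t ht
    have hμne : ml.getD (ρ s) (ρ s) ≠ ml.getD (ρ t) (ρ t) :=
      fun he => hcase ((hμiff s t).mp he)
    have hst : s ≠ t := fun he => hcase (he ▸ rfl)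
    have hA : pvUnion (p, ml) (s, t)
        = (p.insert (ρ t) (ρ s),
           (ml.insert (ρ t) (min (ml.getD (ρ s) (ρ s)) (ml.getD (ρ t) (ρ t)))).insert (ρ s)
             (min (ml.getD (ρ s) (ρ s)) (ml.getD (ρ t) (ρ t)))) := by
      simp [pvUnion, hfs, hft, hcase]
    have hBrel : pvRelabel lbl (s, t)
        = ((PySem.Dict.mk (lbl.items.map (fun kv => (kv.1,
              if kv.2 = ml.getD (ρ s) (ρ s) ∨ kv.2 = ml.getD (ρ t) (ρ t)
              then min (ml.getD (ρ s) (ρ s)) (ml.getD (ρ t) (ρ t)) else kv.2)))).insert s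
            (min (ml.getD (ρ s) (ρ s)) (ml.getD (ρ t) (ρ t)))).insert t
            (min (ml.getD (ρ s) (ρ s)) (ml.getD (ρ t) (ρ t))) := by
      simp [pvRelabel, hBs, hBt, hμne]
    rw [hA, hBrel]
    dsimp only
    -- abbreviations
    set m := min (ml.getD (ρ s) (ρ s)) (ml.getD (ρ t) (ρ t)) with hmdef
    have hmcase : m = ml.getD (ρ s) (ρ s) ∨ m = ml.getD (ρ t) (ρ t) := min_choice _ _
    have hρm : ρ m = ρ s ∨ ρ m = ρ t := by
      rcases hmcase with h1 | h1
      · exact Or.inl (by rw [h1]; exact hM1 s)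
      · exact Or.inr (by rw [h1]; exact hM1 t)
    refine ⟨fun c => if ρ c = ρ t then ρ s else ρ c, ⟨?_, ?_, ?_, ?_, ?_, ?_⟩, ?_⟩
    · exact PySem.Dict.nodup_keys_insert _ _ _ hnd
    · -- reachability with the rerouted parent
      intro c
      dsimp only
      obtain ⟨n, hn, hr⟩ := hR c
      have hnr : pvNr (p.insert (ρ t) (ρ s)) = pvNr p + 1 := pvNr_insert hnd hgetT hcase
      by_cases hct : ρ c = ρ t
      · exact ⟨n + 1, by omega, by
          rw [if_pos hct]
          exact pvReach_insert_rt hRroot hcase (hct ▸ hr)⟩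
      · exact ⟨n, by omega, by
          rw [if_neg hct]
          exact pvReach_insert_ne hTroot hr hct⟩
    · -- roots are stored as themselves
      intro c hsome
      dsimp only
      have hsome' : (p.get? c).isSome := by
        rw [PySem.Dict.get?_insert] at hsome
        by_cases h1 : c = ρ t
        · rw [h1, hgetT]; rfl
        · rwa [if_neg h1] at hsome
      by_cases hct : ρ c = ρ t
      · rw [if_pos hct, PySem.Dict.get?_insert, if_neg hcase]
        exact hgetR
      · rw [if_neg hct, PySem.Dict.get?_insert, if_neg hct]
        exact hC3 c hsome'
    · -- the minlex of each root stays inside its component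
      intro c
      dsimp only
      have hml' : ∀ x, ((ml.insert (ρ t) m).insert (ρ s) m).getD x x
          = if x = ρ s then m else if x = ρ t then m else ml.getD x x := by
        intro x
        rw [PySem.Dict.getD_insert, PySem.Dict.getD_insert]
      have hρ'm : (if ρ m = ρ t then ρ s else ρ m) = ρ s := by
        rcases hρm with h1 | h1
        · rw [h1, if_neg hcase]
        · rw [h1, if_pos rfl]
      by_cases hct : ρ c = ρ t
      · rw [if_pos hct, hml', if_pos rfl, hρ'm]
      · rw [if_neg hct]
        by_cases hcs : ρ c = ρ s
        · rw [hcs, hml', if_pos rfl, hρ'm]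
        · rw [hml', if_neg hcs, if_neg hct]
          rw [hM1 c, if_neg hct]
    · -- B's flat map agrees with minlex-of-root
      intro c
      dsimp only
      have hml' : ∀ x, ((ml.insert (ρ t) m).insert (ρ s) m).getD x x
          = if x = ρ s then m else if x = ρ t then m else ml.getD x x := by
        intro x
        rw [PySem.Dict.getD_insert, PySem.Dict.getD_insert]
      have hmk : ∀ x, (PySem.Dict.mk (lbl.items.map (fun kv => (kv.1,
            if kv.2 = ml.getD (ρ s) (ρ s) ∨ kv.2 = ml.getD (ρ t) (ρ t) then m else kv.2)))).get? x
          = (lbl.get? x).map (fun v =>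
            if v = ml.getD (ρ s) (ρ s) ∨ v = ml.getD (ρ t) (ρ t) then m else v) := by
        intro x
        exact pv_get?_mk_map (fun v =>
          if v = ml.getD (ρ s) (ρ s) ∨ v = ml.getD (ρ t) (ρ t) then m else v) lbl.items x
      rw [PySem.Dict.getD_insert]
      by_cases hct' : c = t
      · rw [if_pos hct', hml']
        have : ρ c = ρ t := by rw [hct']
        rw [if_pos this, if_neg hcase, if_pos rfl]
      · rw [if_neg hct', PySem.Dict.getD_insert]
        by_cases hcs' : c = s
        · rw [if_pos hcs', hml']
          have h1 : ρ c = ρ s := by rw [hcs']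
          have h2 : ρ c ≠ ρ t := fun he => hcase (by rw [← h1, he])
          rw [if_neg h2, if_pos h1]
        · rw [if_neg hcs', PySem.Dict.getD_eq_get?_getD, hmk]
          cases hq : lbl.get? c with
          | none =>
            have hμc : ml.getD (ρ c) (ρ c) = c := by
              have := hB1 c
              rw [PySem.Dict.getD_eq_get?_getD, hq] at this
              exact this.symm
            have hρc : ρ c = c := hB2 c hq (ρ c) (hidem c)
            have hcs : ρ c ≠ ρ s := fun he => hcs' (hB2 c hq s he.symm).symm
            have hct : ρ c ≠ ρ t := fun he => hct' (hB2 c hq t he.symm).symm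
            rw [if_neg hct, hml', if_neg hcs, if_neg hct, hμc]
            rfl
          | some v =>
            have hv : v = ml.getD (ρ c) (ρ c) := by
              have := hB1 c
              rw [PySem.Dict.getD_eq_get?_getD, hq] at this
              exact this.symm ▸ rfl
            simp only [Option.map_some, Option.getD_some]
            by_cases hct : ρ c = ρ t
            · rw [if_pos hct, hml', if_pos rfl]
              have : v = ml.getD (ρ t) (ρ t) := by rw [hv, hct]
              rw [if_pos (Or.inr this)]
            · rw [if_neg hct, hml']
              by_cases hcs : ρ c = ρ s
              · have : v = ml.getD (ρ s) (ρ s) := by rw [hv, hcs]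
                rw [if_pos (Or.inl this), hcs, if_pos rfl]
              · have h1 : ¬ v = ml.getD (ρ s) (ρ s) :=
                  fun he => hcs ((hμiff c s).mp (hv ▸ he))
                have h2 : ¬ v = ml.getD (ρ t) (ρ t) :=
                  fun he => hct ((hμiff c t).mp (hv ▸ he))
                rw [if_neg (by rintro (h | h); exacts [h1 h, h2 h]), if_neg hcs, if_neg hct, hv]
    · -- characters never seen still form singleton components
      intro c hnone d hd
      dsimp only at hd ⊢
      rw [PySem.Dict.get?_insert] at hnone
      by_cases hct' : c = t
      · rw [if_pos hct'] at hnone; exact absurd hnone (by simp)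
      rw [if_neg hct', PySem.Dict.get?_insert] at hnone
      by_cases hcs' : c = s
      · rw [if_pos hcs'] at hnone; exact absurd hnone (by simp)
      rw [if_neg hcs'] at hnone
      rw [pv_get?_mk_map (fun v =>
        if v = ml.getD (ρ s) (ρ s) ∨ v = ml.getD (ρ t) (ρ t) then m else v) lbl.items c] at hnone
      have hq : lbl.get? c = none := by
        cases h : lbl.get? c with
        | none => rfl
        | some v => rw [h] at hnone; exact absurd hnone (by simp)
      have hρc : ρ c = c := hB2 c hq (ρ c) (hidem c)
      have hcs : ρ c ≠ ρ s := fun he => hcs' (hB2 c hq s he.symm).symm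
      have hct : ρ c ≠ ρ t := fun he => hct' (hB2 c hq t he.symm).symm
      rw [if_neg hct] at hd
      by_cases hdt : ρ d = ρ t
      · rw [if_pos hdt] at hd
        exact absurd hd.symm hcs
      · rw [if_neg hdt] at hd
        exact hB2 c hq d hd
    · -- the key set of parent is unchanged
      intro c
      rw [PySem.Dict.get?_insert]
      by_cases h1 : c = ρ t
      · rw [if_pos h1, h1, hgetT]; rfl
      · rw [if_neg h1]

theorem pvFold_inv (edges : List (Char × Char)) (p ml lbl : PySem.Dict Char Char) (ρ : Char → Char)
    (h : PvInv p ml lbl ρ)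
    (hkeys : ∀ e ∈ edges, ((p.get? e.1).isSome ∧ (p.get? e.2).isSome)) :
    ∃ ρ', PvInv (edges.foldl pvUnion (p, ml)).1 (edges.foldl pvUnion (p, ml)).2
      (edges.foldl pvRelabel lbl) ρ' := by
  induction edges generalizing p ml lbl ρ with
  | nil => exact ⟨ρ, h⟩
  | cons e es ih =>
      obtain ⟨s, t⟩ := e
      obtain ⟨ρ', hInv', hkeys'⟩ :=
        pvStep_inv h s t (hkeys (s, t) List.mem_cons_self).1 (hkeys (s, t) List.mem_cons_self).2
      have hpair : pvUnion (p, ml) (s, t)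
          = ((pvUnion (p, ml) (s, t)).1, (pvUnion (p, ml) (s, t)).2) := rfl
      simp only [List.foldl_cons]
      rw [hpair]
      exact ih _ _ _ ρ' hInv' (fun e he => by
        rw [hkeys' e.1, hkeys' e.2]
        exact hkeys e (List.mem_cons_of_mem _ he))

-- ===== VERDICT (by name: the statement is the Claim_ definition above) =====
theorem pvInit_inv (chars : List Char) :
    PvInv (pvMakeSets chars).1 (pvMakeSets chars).2 PySem.Dict.empty id ∧
      (∀ c ∈ chars, ((pvMakeSets chars).1.get? c).isSome) := by
  have hget : ∀ c, (pvMakeSets chars).1.get? c = if c ∈ chars then some c else none := by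
    intro c
    rw [pvMakeSets_fst, pvInitD]
    by_cases hc : c ∈ chars <;> simp [hc]
  have heq2 : (pvMakeSets chars).2 = (pvMakeSets chars).1 := by
    rw [pvMakeSets_fst, pvMakeSets_snd]
  have hgd : ∀ c, (pvMakeSets chars).1.getD c c = c := by
    intro c
    rw [PySem.Dict.getD_eq_get?_getD, hget]
    by_cases hc : c ∈ chars <;> simp [hc]
  refine ⟨⟨?_, ?_, ?_, ?_, ?_, ?_⟩, ?_⟩
  · rw [pvMakeSets_fst]
    exact PySem.Dict.nodup_keys_foldl_insert chars (fun _ c => c) _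
      PySem.Dict.nodup_keys_empty
  · exact fun c => ⟨0, Nat.zero_le _, PvReach.root c (hgd c)⟩
  · intro c hsome
    rw [hget] at hsome ⊢
    by_cases hc : c ∈ chars
    · simp [hc]
    · simp [hc] at hsome
  · intro c
    simp only [id_eq, heq2, hgd]
  · intro c
    simp only [id_eq, heq2, hgd, PySem.Dict.getD_empty]
  · exact fun c _ d hd => hd
  · intro c hc
    rw [hget, if_pos hc]
    rfl

theorem solve_spec : Claim_equal_solve := by
  intro a b target hdom
  unfold Spec_solve solve solve_alt
  obtain ⟨hInv0, hkeys0⟩ := pvInit_inv (a.toList ++ b.toList ++ target.toList)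
  have hkeysE : ∀ e ∈ a.toList.zip b.toList,
      (((pvMakeSets (a.toList ++ b.toList ++ target.toList)).1.get? e.1).isSome ∧
       ((pvMakeSets (a.toList ++ b.toList ++ target.toList)).1.get? e.2).isSome) := by
    intro e he
    obtain ⟨h1, h2⟩ := List.of_mem_zip (by rwa [← @Prod.mk.eta _ _ e] at he)
    exact ⟨hkeys0 _ (by simp [h1]), hkeys0 _ (by simp [h2])⟩
  obtain ⟨ρF, hInvF⟩ := pvFold_inv (a.toList.zip b.toList)
    (pvMakeSets (a.toList ++ b.toList ++ target.toList)).1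
    (pvMakeSets (a.toList ++ b.toList ++ target.toList)).2
    PySem.Dict.empty id hInv0 hkeysE
  obtain ⟨hndF, hRF, hC3F, hM1F, hB1F, hB2F⟩ := hInvF
  refine congrArg String.ofList (List.map_congr_left ?_)
  intro c hc
  dsimp only
  rw [Prod.mk.eta] at hRF hB1F
  rw [pvFind_eq hRF c, hB1F c]
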